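-- pv_equiv track=rewrite | github.com/MariannaVouraki/STIX-UCO | alex-convert.py | ucoclass
-- ===== SOURCE A (Python) =====
-- def ucoclass(stix_type: str) -> str:
--     """
--     Port of Java ucoclass():
--     - Capitalize first letter
--     - If contains '-', remove it and uppercase the char after '-'
--       (only handles first '-' in the Java loop effectively)
--     """
--     if not stix_type:
--         return stix_type
--     chars = list(stix_type)
--     chars[0] = chars[0].upper()
--
--     if "-" in stix_type:
--         for i, ch in enumerate(chars):
--             if ch == "-":
--                 # shift left while uppercasing the next char at position i
--                 for j in range(i, len(chars) - 1):
--                     if j == i: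
--                         chars[i] = chars[i + 1].upper()
--                     else:
--                         chars[j] = chars[j + 1]
--                 chars = chars[:-1]
--                 return "".join(chars)
--     return "".join(chars)
-- ===== SOURCE B (Python) =====
-- def ucoclass(stix_type: str) -> str:
--     head, sep, tail = stix_type.partition('-')
--     cap = head[:1].upper() + head[1:]
--     if not sep:
--         return cap
--     return cap + tail[:1].upper() + tail[1:]
-- ===== Notes on version B (the rewrite author's own statement) =====
-- stated objective: idiomatic
-- what changed: Replaces the mutable char-list with nested shift loops by a loop-free partition('-') and slicing: capitalize the head, and if a dash was found append the tail with its first char uppercased.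
import Mathlib
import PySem

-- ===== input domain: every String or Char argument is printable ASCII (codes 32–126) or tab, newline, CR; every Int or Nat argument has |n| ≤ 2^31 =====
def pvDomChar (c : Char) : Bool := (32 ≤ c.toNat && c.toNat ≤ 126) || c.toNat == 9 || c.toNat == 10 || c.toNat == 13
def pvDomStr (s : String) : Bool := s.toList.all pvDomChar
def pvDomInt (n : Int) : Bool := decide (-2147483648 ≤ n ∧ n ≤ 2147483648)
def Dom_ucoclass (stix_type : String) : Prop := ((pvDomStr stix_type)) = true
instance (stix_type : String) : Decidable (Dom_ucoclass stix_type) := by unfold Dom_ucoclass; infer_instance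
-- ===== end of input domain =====

-- B replaces A's mutable char list with nested shift loops by a loop-free partition('-') + slicing (idiomatic); same return value everywhere.

-- ===== PORT A =====
-- inner 'for j in range(i, len(chars)-1)' shift loop; chars[i+1]/chars[j+1] are always
-- in range in the Python loop (j < len-1), so the getD default ' ' is never used
def ucoShift (chars : List Char) (i : Nat) : List Char :=
  (PySem.List.pyRange (i : Int) ((chars.length : Int) - 1) 1).foldl
    (fun cs j =>
      if j = (i : Int) then cs.set i (PySem.Chars.upperChar (cs.getD (i + 1) ' '))
      else cs.set j.toNat (cs.getD (j.toNat + 1) ' '))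
    chars

-- outer 'for i, ch in enumerate(chars)' with early return on the first '-'
def ucoFind (chars : List Char) : Nat → List Char → Option (List Char)
  | _, [] => none
  | i, ch :: rest =>
    if ch = '-' then some (PySem.List.slice (ucoShift chars i) none (some (-1)))
    else ucoFind chars (i + 1) rest

-- chars[0] = chars[0].upper(); the [] case is unreachable (guarded by the empty-string return)
def ucoCap : List Char → List Char
  | [] => []
  | c :: cr => PySem.Chars.upperChar c :: cr

def ucoclass (stix_type : String) : String :=
  if stix_type = "" then stix_type
  else
    let chars0 := stix_type.toList
    let chars := ucoCap chars0
    if PySem.Str.isIn "-" stix_type then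
      match ucoFind chars 0 chars with
      | some res => String.ofList res
      | none => String.ofList chars
    else String.ofList chars

-- ===== PORT B =====
-- str.partition('-') ported as find + the two slices around the hit
def ucoclass_alt (stix_type : String) : String :=
  let cs := stix_type.toList
  let i := PySem.Chars.find cs ['-']
  let head := if i = -1 then cs else cs.take i.toNat
  let cap := PySem.Chars.upper (head.take 1) ++ head.drop 1
  if i = -1 then String.ofList cap
  else
    let tail := cs.drop (i.toNat + 1)
    String.ofList (cap ++ PySem.Chars.upper (tail.take 1) ++ tail.drop 1)

-- ===== PRECONDITION & SPEC =====
def Spec_ucoclass (stix_type : String) (out : String) : Prop := out = ucoclass_alt stix_type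
instance (stix_type : String) (out : String) : Decidable (Spec_ucoclass stix_type out) := by unfold Spec_ucoclass; infer_instance

-- ===== CLAIM (what is proved, stated in full; the proofs are below) =====
def Claim_equal_ucoclass : Prop := ∀ (stix_type : String), Dom_ucoclass stix_type → Spec_ucoclass stix_type (ucoclass stix_type)

-- ===== LEMMAS AND PROOFS =====

theorem uco_singleton_infix {cs : List Char} : ['-'] <:+: cs ↔ '-' ∈ cs := by
  constructor
  · rintro ⟨p, q, rfl⟩; simp
  · intro h
    obtain ⟨p, q, rfl⟩ := List.mem_iff_append.mp h
    exact ⟨p, q, by simp⟩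

theorem uco_upperChar_ne_dash {c : Char} (h : c ≠ '-') : PySem.Chars.upperChar c ≠ '-' := by
  unfold PySem.Chars.upperChar PySem.Chars.islower
  split
  · rename_i hl
    simp only [Bool.and_eq_true, decide_eq_true_eq] at hl
    have h1 : 97 ≤ c.toNat := by
      have := hl.1; rw [Char.le_def, UInt32.le_iff_toNat_le] at this; exact this
    have h2 : c.toNat ≤ 122 := by
      have := hl.2; rw [Char.le_def, UInt32.le_iff_toNat_le] at this; exact this
    intro he
    have h3 : (Char.ofNat (c.toNat - 32)).toNat = ('-').toNat := by rw [he]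
    rw [Char.toNat_ofNat] at h3
    have hv : (c.toNat - 32).isValidChar := by left; omega
    rw [if_pos hv] at h3
    have h45 : ('-').toNat = 45 := by decide
    omega
  · exact h

theorem uco_singleton_prefix {a : Char} {l : List Char} : [a] <+: l ↔ l.head? = some a := by
  cases l with
  | nil => simp
  | cons b t =>
    constructor
    · rintro ⟨r, hr⟩; simp at hr; simp [hr.1]
    · intro h; simp at h; exact ⟨t, by simp [h]⟩

theorem uco_find_eq {pre suf : List Char} (h : '-' ∉ pre) :
    PySem.Chars.find (pre ++ '-' :: suf) ['-'] = (pre.length : Int) := by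
  have hin : ['-'] <:+: (pre ++ '-' :: suf) := uco_singleton_infix.mpr (by simp)
  have hnn : 0 ≤ PySem.Chars.find (pre ++ '-' :: suf) ['-'] :=
    (PySem.Chars.find_nonneg_iff _ _).mpr hin
  obtain ⟨hpref, hmin⟩ := PySem.Chars.find_spec hnn
  have hhead : (pre ++ '-' :: suf)[(PySem.Chars.find (pre ++ '-' :: suf) ['-']).toNat]? = some '-' := by
    rw [← List.head?_drop]; exact uco_singleton_prefix.mp hpref
  have hgoal : (PySem.Chars.find (pre ++ '-' :: suf) ['-']).toNat = pre.length := by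
    rcases lt_trichotomy (PySem.Chars.find (pre ++ '-' :: suf) ['-']).toNat pre.length with hlt | heq | hgt
    · exfalso
      rw [List.getElem?_append_left hlt] at hhead
      exact h (List.mem_of_getElem? hhead)
    · exact heq
    · exfalso
      apply hmin pre.length hgt
      rw [uco_singleton_prefix, List.head?_drop, List.getElem?_append_right (le_refl _)]
      simp
  omega

-- the pure-shift part of the inner loop
theorem uco_shift_pure (v : List Char) : ∀ (u : List Char) (a : Char),
    (PySem.List.pyRange (u.length : Int) ((u.length : Int) + (v.length : Int)) 1).foldl
      (fun (cs : List Char) (j : Int) => cs.set j.toNat (cs.getD (j.toNat + 1) ' '))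
      (u ++ a :: v)
    = u ++ v ++ [v.getLastD a] := by
  induction v with
  | nil =>
    intro u a
    rw [PySem.List.pyRange_one_eq_nil (by simp)]
    simp
  | cons b v' ih =>
    intro u a
    rw [PySem.List.pyRange_one_cons (by simp only [List.length_cons]; push_cast; omega)]
    rw [List.foldl_cons]
    have hstep : (u ++ a :: b :: v').set ((u.length : Int)).toNat
        ((u ++ a :: b :: v').getD (((u.length : Int)).toNat + 1) ' ') = u ++ b :: b :: v' := by
      simp only [Int.toNat_natCast, List.getD_eq_getElem?_getD,
        List.getElem?_append_right (by omega : u.length ≤ u.length + 1)]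
      simp [List.set_append_right u.length b (le_refl _)]
    rw [hstep]
    have e0 : (u.length : Int) + (((b :: v').length : Int)) = ((u.length : Int) + 1) + ((v'.length : Int)) := by
      simp only [List.length_cons]; push_cast; ring
    rw [e0]
    have e2 : (u.length : Int) + 1 = (((u ++ [b]).length : Int)) := by simp
    rw [e2]
    have hlist : u ++ b :: b :: v' = (u ++ [b]) ++ b :: v' := by simp
    rw [hlist, ih (u ++ [b]) b, List.getLastD_cons]
    simp

theorem uco_shift_eq (u : List Char) (d : Char) (t : List Char) :
    ucoShift (u ++ '-' :: d :: t) u.length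
    = u ++ PySem.Chars.upperChar d :: t ++ [t.getLastD d] := by
  unfold ucoShift
  have hlen : ((((u ++ '-' :: d :: t).length : Nat)) : Int) - 1 = (u.length : Int) + 1 + (t.length : Int) := by
    simp only [List.length_append, List.length_cons]; push_cast; ring
  rw [hlen, PySem.List.pyRange_one_cons (by omega), List.foldl_cons, if_pos rfl]
  have hstep : (u ++ '-' :: d :: t).set u.length
      (PySem.Chars.upperChar ((u ++ '-' :: d :: t).getD (u.length + 1) ' '))
      = (u ++ [PySem.Chars.upperChar d]) ++ d :: t := by
    simp only [List.getD_eq_getElem?_getD,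
      List.getElem?_append_right (by omega : u.length ≤ u.length + 1)]
    simp [List.set_append_right u.length _ (le_refl _)]
  rw [hstep]
  have hcongr : ∀ (acc : List Char), ∀ j ∈ PySem.List.pyRange ((u.length : Int) + 1) ((u.length : Int) + 1 + (t.length : Int)) 1,
      (if j = (u.length : Int) then acc.set u.length (PySem.Chars.upperChar (acc.getD (u.length + 1) ' '))
       else acc.set j.toNat (acc.getD (j.toNat + 1) ' '))
      = acc.set j.toNat (acc.getD (j.toNat + 1) ' ') := by
    intro acc j hj
    rw [PySem.List.mem_pyRange_one] at hj
    rw [if_neg (by omega)]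
  rw [PySem.List.foldl_congr_mem _ _ _ _ hcongr]
  have e2 : (u.length : Int) + 1 = (((u ++ [PySem.Chars.upperChar d]).length : Int)) := by simp
  rw [e2, uco_shift_pure t (u ++ [PySem.Chars.upperChar d]) d]
  simp

theorem uco_shift_trailing (u : List Char) :
    ucoShift (u ++ ['-']) u.length = u ++ ['-'] := by
  unfold ucoShift
  rw [PySem.List.pyRange_one_eq_nil (by simp)]
  rfl

theorem uco_ucoFind_eq (chars : List Char) : ∀ (p : List Char) (q : List Char) (i : Nat), '-' ∉ p →
    ucoFind chars i (p ++ '-' :: q)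
    = some (PySem.List.slice (ucoShift chars (i + p.length)) none (some (-1))) := by
  intro p
  induction p with
  | nil => intro q i _; simp [ucoFind]
  | cons c t ih =>
    intro q i h
    simp at h
    simp only [List.cons_append, ucoFind]
    rw [if_neg (fun e => h.1 e.symm), ih q (i+1) h.2]
    have e : i + (c :: t).length = i + 1 + t.length := by simp only [List.length_cons]; omega
    rw [e]

-- first-occurrence decomposition
theorem uco_first_occ {cs : List Char} (h : '-' ∈ cs) :
    ∃ pre suf, cs = pre ++ '-' :: suf ∧ '-' ∉ pre := by
  induction cs with
  | nil => simp at h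
  | cons c t ih =>
    by_cases hc : c = '-'
    · exact ⟨[], t, by simp [hc], by simp⟩
    · have ht : '-' ∈ t := by simp at h; tauto
      obtain ⟨p, s, hps, hnp⟩ := ih ht
      refine ⟨c :: p, s, by simp [hps], ?_⟩
      simp [hnp]
      exact fun e => hc e.symm

-- ===== VERDICT (by name: the statement is the Claim_ definition above) =====
theorem ucoclass_spec : Claim_equal_ucoclass := by
  unfold Claim_equal_ucoclass
  intro s _
  unfold Spec_ucoclass ucoclass ucoclass_alt
  by_cases hempty : s = ""
  · subst hempty; decide
  rw [if_neg hempty]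
  have hdl : ("-" : String).toList = ['-'] := rfl
  by_cases hmem : '-' ∈ s.toList
  · obtain ⟨pre, suf, hdec, hnp⟩ := uco_first_occ hmem
    have hisin : PySem.Str.isIn "-" s = true := by
      rw [PySem.Str.isIn_iff_infix, hdl]; exact uco_singleton_infix.mpr hmem
    have hfind : PySem.Chars.find s.toList ['-'] = (pre.length : Int) := by
      rw [hdec]; exact uco_find_eq hnp
    rw [hdec] at hfind
    have hfne : ¬ ((pre.length : Int)) = -1 := by omega
    cases pre with
    | nil =>
      simp only [List.nil_append] at hdec hfind ⊢
      cases suf with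
      | nil =>
        simp only [hdec, hisin, hfind, if_true, if_neg hfne]
        rw [ucoCap]
        decide
      | cons d t =>
        simp only [hdec, hisin, hfind, if_true, if_neg hfne]
        rw [ucoCap]
        have hu : PySem.Chars.upperChar '-' = '-' := by decide
        rw [hu]
        have h1 := uco_ucoFind_eq ('-' :: d :: t) [] (d :: t) 0 (by simp)
        simp only [List.nil_append, List.length_nil, Nat.add_zero] at h1
        rw [h1]
        have h2 := uco_shift_eq [] d t
        simp only [List.nil_append, List.length_nil] at h2
        rw [h2, PySem.List.slice_to_neg_one]
        have e3 : (PySem.Chars.upperChar d :: (t ++ [t.getLastD d])).dropLast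
            = PySem.Chars.upperChar d :: t := by
          simpa using (List.dropLast_concat (l₁ := PySem.Chars.upperChar d :: t) (b := t.getLastD d))
        rw [show PySem.Chars.upperChar d :: t ++ [t.getLastD d]
              = PySem.Chars.upperChar d :: (t ++ [t.getLastD d]) from by simp] at *
        rw [e3]
        simp [PySem.Chars.upper]
    | cons c0 p' =>
      simp at hnp
      have hnotp : '-' ∉ PySem.Chars.upperChar c0 :: p' := by
        intro hm
        rcases List.mem_cons.mp hm with h1 | h2
        · exact uco_upperChar_ne_dash (fun e2 => hnp.1 e2.symm) h1.symm
        · exact hnp.2 h2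
      cases suf with
      | nil =>
        simp only [hdec, hisin, hfind, if_true, if_neg hfne]
        rw [show ucoCap (c0 :: p' ++ ['-']) = PySem.Chars.upperChar c0 :: (p' ++ ['-']) from rfl]
        have h1 := uco_ucoFind_eq (PySem.Chars.upperChar c0 :: p' ++ ['-'])
          (PySem.Chars.upperChar c0 :: p') [] 0 hnotp
        simp only [List.cons_append, List.length_cons, Nat.zero_add] at h1
        rw [h1]
        have h2 := uco_shift_trailing (PySem.Chars.upperChar c0 :: p')
        simp only [List.cons_append, List.length_cons] at h2
        rw [h2, PySem.List.slice_to_neg_one]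
        have e3 : (PySem.Chars.upperChar c0 :: (p' ++ ['-'])).dropLast
            = PySem.Chars.upperChar c0 :: p' := by
          simpa using (List.dropLast_concat (l₁ := PySem.Chars.upperChar c0 :: p') (b := '-'))
        rw [e3]
        have t1 : List.take ((((c0 :: p').length : Int)).toNat) (c0 :: p' ++ ['-']) = c0 :: p' := by
          simp [List.take_succ_cons]
        have t2 : List.drop ((((c0 :: p').length : Int)).toNat + 1) (c0 :: p' ++ ['-']) = [] := by
          simp
        rw [t1, t2]
        simp [PySem.Chars.upper]
      | cons d t =>
        simp only [hdec, hisin, hfind, if_true, if_neg hfne]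
        rw [show ucoCap (c0 :: p' ++ '-' :: d :: t) = PySem.Chars.upperChar c0 :: (p' ++ '-' :: d :: t) from rfl]
        have h1 := uco_ucoFind_eq (PySem.Chars.upperChar c0 :: p' ++ '-' :: d :: t)
          (PySem.Chars.upperChar c0 :: p') (d :: t) 0 hnotp
        simp only [List.cons_append, List.length_cons, Nat.zero_add] at h1
        rw [h1]
        have h2 := uco_shift_eq (PySem.Chars.upperChar c0 :: p') d t
        simp only [List.cons_append, List.length_cons] at h2
        rw [h2, PySem.List.slice_to_neg_one]
        have e3 : (PySem.Chars.upperChar c0 :: (p' ++ PySem.Chars.upperChar d :: t ++ [t.getLastD d])).dropLast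
            = PySem.Chars.upperChar c0 :: (p' ++ PySem.Chars.upperChar d :: t) := by
          simpa using (List.dropLast_concat
            (l₁ := PySem.Chars.upperChar c0 :: (p' ++ PySem.Chars.upperChar d :: t)) (b := t.getLastD d))
        rw [e3]
        have t1 : List.take ((((c0 :: p').length : Int)).toNat) (c0 :: p' ++ '-' :: d :: t) = c0 :: p' := by
          simp [List.take_succ_cons]
        have t2 : List.drop ((((c0 :: p').length : Int)).toNat + 1) (c0 :: p' ++ '-' :: d :: t) = d :: t := by
          simp
        rw [t1, t2]
        simp [PySem.Chars.upper]
  · have hisin : PySem.Str.isIn "-" s = false := by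
      rw [Bool.eq_false_iff]
      intro htrue
      rw [PySem.Str.isIn_iff_infix, hdl] at htrue
      exact hmem (uco_singleton_infix.mp htrue)
    have hfind : PySem.Chars.find s.toList ['-'] = -1 :=
      (PySem.Chars.find_eq_neg_one_iff _ _).mpr (fun hinf => hmem (uco_singleton_infix.mp hinf))
    have hne : s.toList ≠ [] := fun h => hempty (String.toList_eq_nil_iff.mp h)
    obtain ⟨c, cr, hcs⟩ : ∃ c cr, s.toList = c :: cr := by
      cases h : s.toList with
      | nil => exact absurd h hne
      | cons c cr => exact ⟨c, cr, rfl⟩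
    rw [hcs] at hfind
    simp only [hcs, hisin, hfind, Bool.false_eq_true, if_false]
    rw [ucoCap]
    simp [PySem.Chars.upper]
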